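-- pv_equiv track=rewrite | github.com/Skalle89/Beecrowd-Exercises | beecrowd_exercicios_em_Python/mathematics/base_32.py | dec_to_32
-- ===== SOURCE A (Python) =====
-- def dec_to_32(x):
--
--     rslt = ""
--
--     while x != 0:
--         if x % 32 > 9:
--             rslt += chr(x % 32 + 55)
--         else:
--             rslt += str(x % 32)
--
--         x //= 32
--
--     return rslt[::-1]
-- ===== SOURCE B (Python) =====
-- DIGITS = "0123456789ABCDEFGHIJKLMNOPQRSTUV"
--
--
-- def dec_to_32(x):
--     if x <= 0:
--         return ""
--     p = 1
--     while p * 32 <= x: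
--         p *= 32
--     out = []
--     while p > 0:
--         d = x // p
--         out.append(DIGITS[d])
--         x -= d * p
--         p //= 32
--     return "".join(out)
-- ===== Notes on version B (the rewrite author's own statement) =====
-- stated objective: alternative
-- what changed: Instead of A's least-significant-first accumulation loop followed by a [::-1] reversal, B first finds the highest power of 32 not exceeding x and then emits digits most-significant-first by repeated division by that descending power, indexing into a digit alphabet string and joining at the end, so no reversal occurs.
import Mathlib
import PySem

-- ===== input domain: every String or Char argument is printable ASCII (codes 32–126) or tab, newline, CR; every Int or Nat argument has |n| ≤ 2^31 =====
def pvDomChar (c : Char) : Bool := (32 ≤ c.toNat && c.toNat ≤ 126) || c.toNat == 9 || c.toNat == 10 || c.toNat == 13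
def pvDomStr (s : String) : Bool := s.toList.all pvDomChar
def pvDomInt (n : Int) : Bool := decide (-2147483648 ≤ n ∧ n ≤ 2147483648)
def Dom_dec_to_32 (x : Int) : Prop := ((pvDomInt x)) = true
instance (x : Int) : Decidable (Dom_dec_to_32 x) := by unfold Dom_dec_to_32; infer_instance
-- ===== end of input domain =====

-- B converts most-significant-digit first by dividing by a precomputed descending power of 32
-- (digit alphabet lookup, no reversal) instead of A's least-significant accumulation + [::-1]
-- (objective: alternative; same cost).

-- ===== PORT A =====
-- the while-loop of A: 'while x != 0: rslt += digit; x //= 32'.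
-- Fuel (x.toNat, always sufficient: x shrinks by a factor 32 each turn) and the guard
-- 'x ≤ 0' (vs Python's 'x != 0') are only totality guards; on x < 0 the Python A
-- never returns (x //= 32 stalls at -1), so those inputs are outside Pre_.
def decLoopA (fuel : Nat) (x : Int) (rslt : String) : String :=
  match fuel with
  | 0 => rslt
  | n + 1 =>
    if x ≤ 0 then rslt
    else decLoopA n (PySem.Int.floordiv x 32)
      (rslt ++ (if PySem.Int.mod x 32 > 9
                then String.ofList [Char.ofNat (PySem.Int.mod x 32 + 55).toNat]  -- chr(x % 32 + 55)
                else PySem.Int.toStr (PySem.Int.mod x 32)))                      -- str(x % 32)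

def dec_to_32 (x : Int) : String :=
  String.ofList ((decLoopA x.toNat x "").toList.reverse)   -- rslt[::-1]: exact, reverses the characters

-- ===== PORT B =====
def pvDigits : String := "0123456789ABCDEFGHIJKLMNOPQRSTUV"

-- 'while p * 32 <= x: p *= 32'; fuel x.toNat is a totality guard only (the loop runs log₃₂ x times)
def findPowB (fuel : Nat) (p x : Int) : Int :=
  match fuel with
  | 0 => p
  | n + 1 => if p * 32 ≤ x then findPowB n (p * 32) x else p

-- 'while p > 0: d = x // p; out.append(DIGITS[d]); x -= d * p; p //= 32'
-- DIGITS[d] is a single character; .getD ' ' is never taken (0 ≤ d ≤ 31 throughout)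
def emitB (fuel : Nat) (p x : Int) (out : List Char) : List Char :=
  match fuel with
  | 0 => out
  | n + 1 =>
    if 0 < p then
      emitB n (PySem.Int.floordiv p 32)
        (x - (PySem.Int.floordiv x p) * p)
        (out ++ [(PySem.Str.pyGet? pvDigits (PySem.Int.floordiv x p)).getD ' '])
    else out

def dec_to_32_alt (x : Int) : String :=
  if x ≤ 0 then ""
  else String.ofList (emitB (x.toNat + 1) (findPowB x.toNat 1 x) x [])   -- "".join(out)

-- ===== PRECONDITION & SPEC =====
-- Pre_ excludes x < 0: there Python A's loop never terminates (x //= 32 stalls at -1), so A returns no value.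
def Pre_dec_to_32 (x : Int) : Prop := 0 ≤ x
instance (x : Int) : Decidable (Pre_dec_to_32 x) := by unfold Pre_dec_to_32; infer_instance
def pvWitness_dec_to_32 : Int := (1000)

def Spec_dec_to_32 (x : Int) (out : String) : Prop := out = dec_to_32_alt x
instance (x : Int) (out : String) : Decidable (Spec_dec_to_32 x out) := by unfold Spec_dec_to_32; infer_instance

-- ===== CLAIM (what is proved, stated in full; the proofs are below) =====
def Claim_equal_dec_to_32 : Prop := ∀ (x : Int), Dom_dec_to_32 x → Pre_dec_to_32 x → Spec_dec_to_32 x (dec_to_32 x)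

-- ===== LEMMAS AND PROOFS =====

-- the canonical most-significant-first digit list both ports are reduced to
def digCh (r : Int) : Char := if 9 < r then Char.ofNat (r + 55).toNat else Char.ofNat (r + 48).toNat

def can (x : Int) : List Char :=
  if h : x ≤ 0 then []
  else can (PySem.Int.floordiv x 32) ++ [digCh (PySem.Int.mod x 32)]
termination_by x.toNat
decreasing_by
  have h1 : PySem.Int.floordiv x 32 = x / 32 := PySem.Int.floordiv_eq_ediv_of_pos (by norm_num)
  rw [h1]; omega

theorem digitA_toList (r : Int) (h0 : 0 ≤ r) (h1 : r < 32) :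
    ((if 9 < r then String.ofList [Char.ofNat (r + 55).toNat] else PySem.Int.toStr r) : String).toList
      = [digCh r] := by
  interval_cases r <;> decide

theorem decLoopA_acc (n : Nat) : ∀ (x : Int) (acc : String),
    decLoopA n x acc = acc ++ decLoopA n x "" := by
  induction n with
  | zero => intro x acc; simp [decLoopA]
  | succ n ih =>
    intro x acc
    by_cases hle : x ≤ 0
    · simp [decLoopA, hle]
    · conv_lhs => rw [decLoopA, if_neg hle, ih]
      conv_rhs => rw [decLoopA, if_neg hle, ih]
      simp [String.append_assoc]

theorem lemA (f : Nat) : ∀ (x : Int), x < 32 ^ f →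
    (decLoopA f x "").toList.reverse = can x := by
  induction f with
  | zero =>
    intro x hx
    have hx0 : x ≤ 0 := by norm_num at hx; omega
    rw [can, dif_pos hx0]
    simp [decLoopA]
  | succ f ih =>
    intro x hx
    by_cases hle : x ≤ 0
    · rw [can, dif_pos hle]; simp [decLoopA, hle]
    · have h32 : (0:Int) < 32 := by norm_num
      have hfd : PySem.Int.floordiv x 32 = x / 32 := PySem.Int.floordiv_eq_ediv_of_pos h32
      have hlt : x / 32 < 32 ^ f := by
        rw [Int.ediv_lt_iff_lt_mul h32]
        calc x < 32 ^ (f + 1) := hx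
        _ = 32 ^ f * 32 := by ring
      have hmd : PySem.Int.mod x 32 = x % 32 := PySem.Int.mod_eq_emod_of_pos h32
      have hm0 : 0 ≤ PySem.Int.mod x 32 := by rw [hmd]; omega
      have hm1 : PySem.Int.mod x 32 < 32 := by rw [hmd]; omega
      rw [can, dif_neg hle]
      rw [decLoopA, if_neg hle, decLoopA_acc]
      simp only [String.toList_append, List.reverse_append]
      rw [digitA_toList _ hm0 hm1, hfd, ih _ (hfd ▸ hlt)]
      simp

theorem lemA_final (x : Int) (hx : 0 ≤ x) : (dec_to_32 x).toList = can x := by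
  unfold dec_to_32
  rw [String.toList_ofList]
  apply lemA
  rcases eq_or_lt_of_le hx with h | h
  · subst h; norm_num
  · have h1 : x.toNat < 32 ^ x.toNat := Nat.lt_pow_self (by norm_num)
    have h2 : x = (x.toNat : Int) := by omega
    rw [h2]
    exact_mod_cast h1

-- B-side arithmetic facts
theorem fact_modmod (n : Nat) (x : Int) : x % 32 ^ (n + 1) % 32 = x % 32 :=
  Int.emod_emod_of_dvd _ ⟨32 ^ n, by ring⟩

theorem fact_moddiv (n : Nat) (x : Int) (hx : 0 ≤ x) :
    x % 32 ^ (n + 1) / 32 = x / 32 % 32 ^ n := by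
  have hm : (0:Int) < 32 ^ n := by positivity
  have e2 : 32 ^ n * (x / 32 / 32 ^ n) + x / 32 % 32 ^ n = x / 32 := Int.ediv_add_emod _ _
  have hx2 : x = (32 * (x / 32 % 32 ^ n) + x % 32) + 32 ^ (n + 1) * (x / 32 / 32 ^ n) := by
    have hp : (32:Int) ^ (n + 1) = 32 * 32 ^ n := by ring
    calc x = 32 * (x / 32) + x % 32 := by omega
    _ = 32 * (32 ^ n * (x / 32 / 32 ^ n) + x / 32 % 32 ^ n) + x % 32 := by rw [e2]
    _ = (32 * (x / 32 % 32 ^ n) + x % 32) + 32 ^ (n + 1) * (x / 32 / 32 ^ n) := by rw [hp]; ring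
  have hs0 : 0 ≤ x / 32 % 32 ^ n := Int.emod_nonneg _ (by positivity)
  have hs1 : x / 32 % 32 ^ n < 32 ^ n := Int.emod_lt_of_pos _ hm
  have hr0 : 0 ≤ x % 32 := by omega
  have hr1 : x % 32 < 32 := by omega
  have hmod : x % 32 ^ (n + 1) = 32 * (x / 32 % 32 ^ n) + x % 32 := by
    conv_lhs => rw [hx2]
    rw [Int.add_mul_emod_self_left]
    apply Int.emod_eq_of_lt (by omega)
    have hp : (32:Int) ^ (n + 1) = 32 * 32 ^ n := by ring
    omega
  rw [hmod]
  have h3 : 32 * (x / 32 % 32 ^ n) + x % 32 = x % 32 + 32 * (x / 32 % 32 ^ n) := by ring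
  rw [h3, Int.add_mul_ediv_left _ _ (by norm_num : (32:Int) ≠ 0),
      Int.ediv_eq_zero_of_lt hr0 hr1]
  omega

-- the fixed-width low-digit list
def dl : Nat → Int → List Char
  | 0, _ => []
  | n + 1, x => dl n (x / 32) ++ [digCh (x % 32)]

-- the digit list emitB produces from p = 32^k
def ebSpec : Nat → Int → List Char
  | 0, x => [digCh x]
  | k + 1, x => digCh (x / 32 ^ (k + 1)) :: ebSpec k (x % 32 ^ (k + 1))

theorem digB_eq (d : Int) (h0 : 0 ≤ d) (h1 : d < 32) :
    ((PySem.Str.pyGet? pvDigits d).getD ' ') = digCh d := by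
  interval_cases d <;> decide

theorem emitB_zero (f : Nat) (x : Int) (out : List Char) : emitB f 0 x out = out := by
  cases f <;> simp [emitB]

theorem findPowB_spec (f : Nat) : ∀ (j : Nat) (x : Int),
    (32:Int) ^ j ≤ x → x < 32 ^ (j + f) →
    ∃ k : Nat, findPowB f ((32:Int) ^ j) x = 32 ^ k ∧ (32:Int) ^ k ≤ x ∧ x < 32 ^ (k + 1) := by
  induction f with
  | zero =>
    intro j x h1 h2
    rw [Nat.add_zero] at h2
    omega
  | succ f ih =>
    intro j x h1 h2
    rw [findPowB]
    by_cases hc : (32:Int) ^ j * 32 ≤ x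
    · rw [if_pos hc]
      have hp : (32:Int) ^ j * 32 = 32 ^ (j + 1) := by ring
      rw [hp]
      apply ih (j + 1) x (hp ▸ hc)
      have hjj : j + 1 + f = j + (f + 1) := by omega
      rw [hjj]
      exact h2
    · rw [if_neg hc]
      refine ⟨j, rfl, h1, ?_⟩
      have hp : (32:Int) ^ (j + 1) = 32 ^ j * 32 := by ring
      omega

theorem emitB_spec (k : Nat) : ∀ (f : Nat) (x : Int) (out : List Char), k < f →
    0 ≤ x → x < 32 ^ (k + 1) →
    emitB f ((32:Int) ^ k) x out = out ++ ebSpec k x := by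
  induction k with
  | zero =>
    intro f x out hf hx0 hx1
    obtain ⟨f', rfl⟩ : ∃ f', f = f' + 1 := ⟨f - 1, by omega⟩
    rw [emitB]
    have h1 : PySem.Int.floordiv x 1 = x := by
      rw [PySem.Int.floordiv_eq_ediv_of_pos (by norm_num)]; exact Int.ediv_one x
    have h2 : PySem.Int.floordiv (1:Int) 32 = 0 := by
      rw [PySem.Int.floordiv_eq_ediv_of_pos (by norm_num)]; decide
    simp only [pow_zero, if_pos (by norm_num : (0:Int) < 1)]
    rw [h1, h2, emitB_zero]
    rw [digB_eq x hx0 (by norm_num at hx1; omega)]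
    rfl
  | succ k ih =>
    intro f x out hf hx0 hx1
    obtain ⟨f', rfl⟩ : ∃ f', f = f' + 1 := ⟨f - 1, by omega⟩
    rw [emitB]
    have hp : (0:Int) < 32 ^ (k + 1) := by positivity
    rw [if_pos hp]
    have hfd : PySem.Int.floordiv x (32 ^ (k + 1)) = x / 32 ^ (k + 1) :=
      PySem.Int.floordiv_eq_ediv_of_pos hp
    have hpd : PySem.Int.floordiv ((32:Int) ^ (k + 1)) 32 = 32 ^ k := by
      rw [PySem.Int.floordiv_eq_ediv_of_pos (by norm_num)]
      have : (32:Int) ^ (k + 1) = 32 ^ k * 32 := by ring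
      rw [this, Int.mul_ediv_cancel _ (by norm_num)]
    have hd0 : 0 ≤ x / 32 ^ (k + 1) := Int.ediv_nonneg hx0 (by positivity)
    have hd1 : x / 32 ^ (k + 1) < 32 := by
      rw [Int.ediv_lt_iff_lt_mul hp]
      calc x < 32 ^ (k + 1 + 1) := hx1
      _ = 32 * 32 ^ (k + 1) := by ring
    have hx' : x - x / 32 ^ (k + 1) * 32 ^ (k + 1) = x % 32 ^ (k + 1) := by
      rw [Int.emod_def]; ring
    rw [hfd, hpd, hx', digB_eq _ hd0 hd1]
    rw [ih f' (x % 32 ^ (k + 1)) _ (by omega) (Int.emod_nonneg _ (by positivity))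
        (Int.emod_lt_of_pos _ hp)]
    simp [ebSpec]

theorem dl_top (n : Nat) : ∀ (x : Int), 0 ≤ x → x < 32 ^ (n + 2) →
    dl (n + 2) x = digCh (x / 32 ^ (n + 1)) :: dl (n + 1) (x % 32 ^ (n + 1)) := by
  induction n with
  | zero =>
    intro x hx0 hx1
    show dl 1 (x / 32) ++ [digCh (x % 32)] = _
    have h1 : x / 32 % 32 = x / 32 := by
      apply Int.emod_eq_of_lt (Int.ediv_nonneg hx0 (by norm_num))
      rw [Int.ediv_lt_iff_lt_mul (by norm_num : (0:Int) < 32)]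
      norm_num at hx1 ⊢; omega
    have h2 : x % 32 % 32 = x % 32 := Int.emod_emod_of_dvd _ dvd_rfl
    show [digCh (x / 32 % 32)] ++ [digCh (x % 32)]
        = digCh (x / 32 ^ 1) :: dl 1 (x % 32 ^ 1)
    rw [h1]
    show _ = digCh (x / 32 ^ 1) :: ([digCh (x % 32 ^ 1 % 32)])
    norm_num [h2]
  | succ n ih =>
    intro x hx0 hx1
    show dl (n + 2) (x / 32) ++ [digCh (x % 32)] = _
    have hq0 : 0 ≤ x / 32 := Int.ediv_nonneg hx0 (by norm_num)
    have hq1 : x / 32 < 32 ^ (n + 2) := by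
      rw [Int.ediv_lt_iff_lt_mul (by norm_num : (0:Int) < 32)]
      calc x < 32 ^ (n + 1 + 2) := hx1
      _ = 32 ^ (n + 2) * 32 := by ring
    rw [ih (x / 32) hq0 hq1]
    have hdd : x / 32 / 32 ^ (n + 1) = x / 32 ^ (n + 2) := by
      rw [Int.ediv_ediv_eq_ediv_mul]
      · have hp : (32:Int) * 32 ^ (n + 1) = 32 ^ (n + 2) := by ring
        rw [hp]
      · norm_num
    show (digCh (x / 32 / 32 ^ (n + 1)) :: dl (n + 1) (x / 32 % 32 ^ (n + 1))) ++ [digCh (x % 32)] = _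
    show _ = digCh (x / 32 ^ (n + 2)) :: (dl (n + 1) (x % 32 ^ (n + 2) / 32) ++ [digCh (x % 32 ^ (n + 2) % 32)])
    rw [hdd, fact_moddiv (n + 1) x hx0, fact_modmod (n + 1) x]
    simp

theorem ebSpec_eq_dl (k : Nat) : ∀ (x : Int), 0 ≤ x → x < 32 ^ (k + 1) →
    ebSpec k x = dl (k + 1) x := by
  induction k with
  | zero =>
    intro x hx0 hx1
    show [digCh x] = [] ++ [digCh (x % 32)]
    rw [Int.emod_eq_of_lt hx0 (by norm_num at hx1; omega)]
    rfl
  | succ k ih =>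
    intro x hx0 hx1
    show digCh (x / 32 ^ (k + 1)) :: ebSpec k (x % 32 ^ (k + 1)) = dl (k + 2) x
    rw [ih _ (Int.emod_nonneg _ (by positivity)) (Int.emod_lt_of_pos _ (by positivity)),
        dl_top k x hx0 hx1]

theorem dl_eq_can (k : Nat) : ∀ (x : Int), (32:Int) ^ k ≤ x → x < 32 ^ (k + 1) →
    dl (k + 1) x = can x := by
  induction k with
  | zero =>
    intro x hx0 hx1
    norm_num at hx0 hx1
    have hpos : ¬ x ≤ 0 := by omega
    rw [can, dif_neg hpos]
    have h1 : PySem.Int.floordiv x 32 = 0 := by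
      rw [PySem.Int.floordiv_eq_ediv_of_pos (by norm_num)]
      exact Int.ediv_eq_zero_of_lt (by omega) hx1
    have h2 : PySem.Int.mod x 32 = x % 32 := PySem.Int.mod_eq_emod_of_pos (by norm_num)
    rw [h1, h2, can]
    show [] ++ [digCh (x % 32)] = [] ++ [digCh (x % 32)]
    rfl
  | succ k ih =>
    intro x hx0 hx1
    have hpow : (1:Int) ≤ 32 ^ (k + 1) := one_le_pow₀ (by norm_num)
    have hpos : ¬ x ≤ 0 := by omega
    rw [can, dif_neg hpos]
    have hfd : PySem.Int.floordiv x 32 = x / 32 := PySem.Int.floordiv_eq_ediv_of_pos (by norm_num)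
    have hmd : PySem.Int.mod x 32 = x % 32 := PySem.Int.mod_eq_emod_of_pos (by norm_num)
    have hq0 : (32:Int) ^ k ≤ x / 32 := by
      rw [Int.le_ediv_iff_mul_le (by norm_num : (0:Int) < 32)]
      calc (32:Int) ^ k * 32 = 32 ^ (k + 1) := by ring
      _ ≤ x := hx0
    have hq1 : x / 32 < 32 ^ (k + 1) := by
      rw [Int.ediv_lt_iff_lt_mul (by norm_num : (0:Int) < 32)]
      calc x < 32 ^ (k + 1 + 1) := hx1
      _ = 32 ^ (k + 1) * 32 := by ring
    rw [hfd, hmd, ← ih (x / 32) hq0 hq1]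
    rfl

theorem lemB_final (x : Int) (hx : 0 < x) : (dec_to_32_alt x).toList = can x := by
  unfold dec_to_32_alt
  rw [if_neg (by omega)]
  rw [String.toList_ofList]
  have hxpow : x < 32 ^ x.toNat := by
    have h1 : x.toNat < 32 ^ x.toNat := Nat.lt_pow_self (by norm_num)
    have h2 : x = (x.toNat : Int) := by omega
    rw [h2]; exact_mod_cast h1
  obtain ⟨k, hfp, hk0, hk1⟩ :=
    findPowB_spec x.toNat 0 x (by norm_num; omega) (by simpa using hxpow)
  rw [pow_zero] at hfp
  have hkf : k < x.toNat + 1 := by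
    have h1 : k < 32 ^ k := Nat.lt_pow_self (by norm_num)
    have h2 : ((32:Int) ^ k) = ((32 ^ k : Nat) : Int) := by push_cast; ring
    omega
  rw [hfp, emitB_spec k _ x [] hkf (by omega) hk1]
  rw [ebSpec_eq_dl k x (by omega) hk1, dl_eq_can k x hk0 hk1]
  rfl

-- ===== VERDICT (by name: the statement is the Claim_ definition above) =====
theorem dec_to_32_spec : Claim_equal_dec_to_32 := by
  intro x _ hpre
  unfold Spec_dec_to_32
  rcases eq_or_lt_of_le hpre with h | h
  · subst h; decide
  · apply String.toList_inj.mp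
    rw [lemA_final x (by omega), lemB_final x h]
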